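-- pv_equiv track=rewrite | github.com/small-java-world/DiffGR | diffgr_rust_gui/compat/python/diffgr/reviewability.py | _chunk_change_counts
-- ===== SOURCE A (Python) =====
-- from typing import Any
--
-- def _chunk_change_counts(chunk: dict[str, Any]) -> dict[str, int]:
--     add_lines = 0
--     delete_lines = 0
--     context_lines = 0
--     for line in chunk.get("lines", []) or []:
--         kind = str(line.get("kind", "")).strip()
--         if kind == "add":
--             add_lines += 1
--         elif kind == "delete":
--             delete_lines += 1
--         else:
--             context_lines += 1
--     return {
--         "addLines": add_lines,
--         "deleteLines": delete_lines,
--         "contextLines": context_lines,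
--         "changedLines": add_lines + delete_lines,
--     }
-- ===== SOURCE B (Python) =====
-- from typing import Any
--
-- def _chunk_change_counts(chunk: dict[str, Any]) -> dict[str, int]:
--     kinds = [str(l.get("kind", "")).strip() for l in chunk.get("lines", []) or []]
--     add_lines = kinds.count("add")
--     delete_lines = kinds.count("delete")
--     return {
--         "addLines": add_lines,
--         "deleteLines": delete_lines,
--         "contextLines": len(kinds) - add_lines - delete_lines,
--         "changedLines": add_lines + delete_lines,
--     }
-- ===== Notes on version B (the rewrite author's own statement) =====
-- stated objective: idiomatic
-- what changed: Replaces the three-way per-line branch accumulating three counters with one pass materializing the stripped kinds, counting 'add' and 'delete' directly, and deriving contextLines by subtraction from the total length.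
import Mathlib
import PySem

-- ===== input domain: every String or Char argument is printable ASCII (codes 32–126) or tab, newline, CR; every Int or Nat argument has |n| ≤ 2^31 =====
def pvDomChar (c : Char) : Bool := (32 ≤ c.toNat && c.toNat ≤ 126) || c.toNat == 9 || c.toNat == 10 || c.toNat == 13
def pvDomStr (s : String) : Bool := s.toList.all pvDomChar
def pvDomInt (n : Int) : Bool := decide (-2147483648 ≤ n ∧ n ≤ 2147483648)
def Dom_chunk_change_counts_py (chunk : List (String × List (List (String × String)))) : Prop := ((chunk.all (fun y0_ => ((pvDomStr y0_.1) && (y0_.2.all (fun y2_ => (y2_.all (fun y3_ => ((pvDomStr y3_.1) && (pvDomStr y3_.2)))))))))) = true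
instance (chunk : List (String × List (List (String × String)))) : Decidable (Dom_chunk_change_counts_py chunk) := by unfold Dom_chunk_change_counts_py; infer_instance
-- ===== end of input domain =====

-- B replaces A's three-way per-line branch with one pass over the stripped kinds,
-- counting "add" and "delete" and deriving contextLines by subtraction (idiomatic decomposition; return value only).

-- ===== PORT A =====
def chunk_change_counts_py (chunk : List (String × List (List (String × String)))) : List (String × Int) :=
  let lines0 := (PySem.Dict.mk chunk).getD "lines" []
  let lines := if lines0.isEmpty then [] else lines0   -- `chunk.get("lines", []) or []`
  let s := lines.foldl (fun (st : Int × Int × Int) line =>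
    let kind := PySem.Str.strip ((PySem.Dict.mk line).getD "kind" "")
    if kind == "add" then (st.1 + 1, st.2.1, st.2.2)
    else if kind == "delete" then (st.1, st.2.1 + 1, st.2.2)
    else (st.1, st.2.1, st.2.2 + 1)) (0, 0, 0)
  [("addLines", s.1), ("deleteLines", s.2.1), ("contextLines", s.2.2), ("changedLines", s.1 + s.2.1)]

-- ===== PORT B =====
def chunk_change_counts_py_alt (chunk : List (String × List (List (String × String)))) : List (String × Int) :=
  let lines0 := (PySem.Dict.mk chunk).getD "lines" []
  let lines := if lines0.isEmpty then [] else lines0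
  let kinds := lines.map (fun line => PySem.Str.strip ((PySem.Dict.mk line).getD "kind" ""))
  let add : Int := kinds.count "add"
  let del : Int := kinds.count "delete"
  [("addLines", add), ("deleteLines", del), ("contextLines", (kinds.length : Int) - add - del), ("changedLines", add + del)]

-- ===== PRECONDITION & SPEC =====
def Spec_chunk_change_counts_py (chunk : List (String × List (List (String × String)))) (out : List (String × Int)) : Prop := out = chunk_change_counts_py_alt chunk
instance (chunk : List (String × List (List (String × String)))) (out : List (String × Int)) : Decidable (Spec_chunk_change_counts_py chunk out) := by unfold Spec_chunk_change_counts_py; infer_instance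

-- ===== CLAIM (what is proved, stated in full; the proofs are below) =====
def Claim_equal_chunk_change_counts_py : Prop := ∀ (chunk : List (String × List (List (String × String)))), Dom_chunk_change_counts_py chunk → Spec_chunk_change_counts_py chunk (chunk_change_counts_py chunk)

-- ===== LEMMAS AND PROOFS =====

lemma fold_counts (l : List (List (String × String))) (a d c : Int) :
    l.foldl (fun (st : Int × Int × Int) line =>
      let kind := PySem.Str.strip ((PySem.Dict.mk line).getD "kind" "")
      if kind == "add" then (st.1 + 1, st.2.1, st.2.2)
      else if kind == "delete" then (st.1, st.2.1 + 1, st.2.2)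
      else (st.1, st.2.1, st.2.2 + 1)) (a, d, c)
    = (a + ((l.map (fun line => PySem.Str.strip ((PySem.Dict.mk line).getD "kind" ""))).count "add" : Int),
       d + ((l.map (fun line => PySem.Str.strip ((PySem.Dict.mk line).getD "kind" ""))).count "delete" : Int),
       c + (l.length : Int)
         - ((l.map (fun line => PySem.Str.strip ((PySem.Dict.mk line).getD "kind" ""))).count "add" : Int)
         - ((l.map (fun line => PySem.Str.strip ((PySem.Dict.mk line).getD "kind" ""))).count "delete" : Int)) := by
  induction l generalizing a d c with
  | nil => simp
  | cons x xs ih =>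
    simp only [List.foldl_cons]
    split_ifs with h1 h2
      <;> rw [ih]
    · have e : PySem.Str.strip ((PySem.Dict.mk x).getD "kind" "") = "add" := by simpa using h1
      simp only [List.map_cons, List.count_cons, List.length_cons, Prod.mk.injEq, e]
      refine ⟨?_, ?_, ?_⟩ <;> push_cast <;> simp <;> ring
    · have e : PySem.Str.strip ((PySem.Dict.mk x).getD "kind" "") = "delete" := by simpa using h2
      simp only [List.map_cons, List.count_cons, List.length_cons, Prod.mk.injEq, e]
      refine ⟨?_, ?_, ?_⟩ <;> push_cast <;> simp <;> ring
    · simp only [List.map_cons, List.count_cons, List.length_cons, Prod.mk.injEq]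
      refine ⟨?_, ?_, ?_⟩ <;> push_cast <;> simp [h1, h2] <;> ring

-- ===== VERDICT =====
theorem chunk_change_counts_py_spec : Claim_equal_chunk_change_counts_py := by
  intro chunk _
  unfold Spec_chunk_change_counts_py chunk_change_counts_py chunk_change_counts_py_alt
  simp only [fold_counts, List.length_map, zero_add]
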